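-- pv_equiv track=rewrite | github.com/staticoahi/PWD_Check | password_checker.py | check_password_weaknesses
-- ===== SOURCE A (Python) =====
-- import string
--
-- def check_password_weaknesses(password, common_passwords):
--     """
--     Checks a password against a set of rules and returns a list of weaknesses.
--
--     Args:
--         password (str): The password to check.
--
--     Returns:
--         list: A list of strings, where each string is a description of a weakness found.
--               An empty list means the password has no weaknesses based on these rules.
--     """
--     weaknesses = []
--     min_length = 8
--
--     if len(password) < min_length:
--         weaknesses.append(f"Is shorter than the minimum of {min_length} characters.")
--
--     if not any(c.isupper() for c in password):
--         weaknesses.append("Does not contain any uppercase letters.")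
--
--     if not any(c.islower() for c in password):
--         weaknesses.append("Does not contain any lowercase letters.")
--
--     if not any(c.isdigit() for c in password):
--         weaknesses.append("Does not contain any numbers.")
--
--     if not any(c in string.punctuation for c in password):
--         weaknesses.append("Does not contain any special characters.")
--
--     if password.lower() in common_passwords:
--         weaknesses.append("This Password is unfortunally known in A Password Leak")
--
--     for i in range(len(password) - 2):
--         if (
--             password[i : i + 3].isalpha()
--             and ord(password[i].lower()) + 1 == ord(password[i + 1].lower())
--             and ord(password[i + 1].lower()) + 1 == ord(password[i + 2].lower())
--         ):
--             weaknesses.append("Contains sequential characters (like 'abc').")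
--             break
--
--     for i in range(len(password) - 2):
--         if (
--             password[i : i + 3].isdigit()
--             and int(password[i]) + 1 == int(password[i + 1])
--             and int(password[i + 1]) + 1 == int(password[i + 2])
--         ):
--             weaknesses.append("Contains sequential numbers (like '123').")
--             break
--
--     for i in range(len(password) - 2):
--         if password[i] == password[i + 1] == password[i + 2]:
--             weaknesses.append("Contains repeating characters (like 'aaa').")
--             break
--     if len(weaknesses) == 0:
--         score = "High Grade of security"
--     elif len(weaknesses) <= 2:
--         score = "Medium Grade of security"
--     else:
--         score = "Low Grade of security"
--     return weaknesses, score
-- ===== SOURCE B (Python) =====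
-- import string
--
-- def check_password_weaknesses(password, common_passwords):
--     chars = set(password)
--     letters = ''.join(c.lower() if c.isalpha() else ' ' for c in password)
--     digits = ''.join(c if c.isdigit() else ' ' for c in password)
--     abc = string.ascii_lowercase
--     weaknesses = []
--     if len(password) < 8:
--         weaknesses.append("Is shorter than the minimum of 8 characters.")
--     if chars.isdisjoint(string.ascii_uppercase):
--         weaknesses.append("Does not contain any uppercase letters.")
--     if chars.isdisjoint(string.ascii_lowercase):
--         weaknesses.append("Does not contain any lowercase letters.")
--     if chars.isdisjoint(string.digits):
--         weaknesses.append("Does not contain any numbers.")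
--     if chars.isdisjoint(string.punctuation):
--         weaknesses.append("Does not contain any special characters.")
--     if password.lower() in common_passwords:
--         weaknesses.append("This Password is unfortunally known in A Password Leak")
--     if any(abc[j:j + 3] in letters for j in range(len(abc) - 2)):
--         weaknesses.append("Contains sequential characters (like 'abc').")
--     if any(string.digits[j:j + 3] in digits for j in range(len(string.digits) - 2)):
--         weaknesses.append("Contains sequential numbers (like '123').")
--     if any(c * 3 in password for c in chars):
--         weaknesses.append("Contains repeating characters (like 'aaa').")
--     if len(weaknesses) == 0:
--         score = "High Grade of security"
--     elif len(weaknesses) <= 2: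
--         score = "Medium Grade of security"
--     else:
--         score = "Low Grade of security"
--     return weaknesses, score
-- ===== Notes on version B (the rewrite author's own statement) =====
-- stated objective: alternative
-- what changed: A scans the password once per rule (any() per character class and three index loops over 3-char windows); B instead builds set(password) and answers the class rules by set-disjointness against the alphabet/digit/punctuation constants, and answers the three window rules by substring search: 'abc'..'xyz' / '012'..'789' against a masked copy of the password and c*3 against the password itself.
import Mathlib
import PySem

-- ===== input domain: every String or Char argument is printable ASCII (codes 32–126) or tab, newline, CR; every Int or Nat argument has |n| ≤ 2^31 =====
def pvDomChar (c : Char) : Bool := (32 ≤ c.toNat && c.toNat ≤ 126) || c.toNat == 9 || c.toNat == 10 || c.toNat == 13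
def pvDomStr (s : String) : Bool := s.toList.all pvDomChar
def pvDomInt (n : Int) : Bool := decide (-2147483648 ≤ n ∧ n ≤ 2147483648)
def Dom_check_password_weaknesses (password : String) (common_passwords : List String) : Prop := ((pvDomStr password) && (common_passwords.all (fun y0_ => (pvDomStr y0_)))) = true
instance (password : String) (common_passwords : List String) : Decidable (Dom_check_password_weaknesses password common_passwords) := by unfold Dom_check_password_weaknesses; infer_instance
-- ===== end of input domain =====

-- B replaces A's per-rule character scans by set operations and substring searches: the class
-- rules become set-disjointness tests against the alphabet/digit/punctuation constants, and the
-- three sliding-window rules become substring tests ("abc".."xyz" / "012".."789" against a masked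
-- copy of the password, c*3 against the password itself); objective: alternative algorithm.

-- ===== PORT A =====
-- string.punctuation
def pvPunct : List Char := "!\"#$%&'()*+,-./:;<=>?@[\\]^_`{|}~".toList

-- `c in string.punctuation` (1-char substring test)
def punctMem (c : Char) : Bool := PySem.Chars.isIn [c] pvPunct

-- a == b == c  (chained comparison)
def condRep (l : List Char) (i : Nat) : Bool :=
  (l.getD i ' ' == l.getD (i+1) ' ') && (l.getD (i+1) ' ' == l.getD (i+2) ' ')

-- A's sequential-letters window condition, with the Python slice password[i:i+3]
def condAlphaA (l : List Char) (i : Nat) : Bool :=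
  PySem.Chars.strIsalpha (PySem.List.slice l (some (i : Int)) (some ((i : Int) + 3)))
  && ((PySem.Chars.lowerChar (l.getD i ' ')).toNat + 1 == (PySem.Chars.lowerChar (l.getD (i+1) ' ')).toNat)
  && ((PySem.Chars.lowerChar (l.getD (i+1) ' ')).toNat + 1 == (PySem.Chars.lowerChar (l.getD (i+2) ' ')).toNat)

-- A's sequential-digits window condition; int(c) via PySem.Int.ofChars? — the strIsdigit
-- guard makes it `some`, so the `.getD 0` default is never the value
def condDigitA (l : List Char) (i : Nat) : Bool :=
  PySem.Chars.strIsdigit (PySem.List.slice l (some (i : Int)) (some ((i : Int) + 3)))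
  && ((PySem.Int.ofChars? [l.getD i ' ']).getD 0 + 1 == (PySem.Int.ofChars? [l.getD (i+1) ' ']).getD 0)
  && ((PySem.Int.ofChars? [l.getD (i+1) ' ']).getD 0 + 1 == (PySem.Int.ofChars? [l.getD (i+2) ' ']).getD 0)

-- `for i in range(stop): if cond(i): …; break` — true iff some index fires
def aLoop (cond : Nat → Bool) (i stop : Nat) : Bool :=
  if i < stop then (if cond i then true else aLoop cond (i+1) stop) else false
termination_by stop - i

def check_password_weaknesses (password : String) (common_passwords : List String) : List String × String :=
  let l := password.toList
  let weaknesses :=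
    (if l.length < 8 then ["Is shorter than the minimum of 8 characters."] else [])
    ++ (if !(l.any PySem.Chars.isupper) then ["Does not contain any uppercase letters."] else [])
    ++ (if !(l.any PySem.Chars.islower) then ["Does not contain any lowercase letters."] else [])
    ++ (if !(l.any PySem.Chars.isdigit) then ["Does not contain any numbers."] else [])
    ++ (if !(l.any punctMem) then ["Does not contain any special characters."] else [])
    ++ (if common_passwords.contains (PySem.Str.lower password) then ["This Password is unfortunally known in A Password Leak"] else [])
    ++ (if aLoop (condAlphaA l) 0 (l.length - 2) then ["Contains sequential characters (like 'abc')."] else [])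
    ++ (if aLoop (condDigitA l) 0 (l.length - 2) then ["Contains sequential numbers (like '123')."] else [])
    ++ (if aLoop (condRep l) 0 (l.length - 2) then ["Contains repeating characters (like 'aaa')."] else [])
  (weaknesses,
    if weaknesses.length == 0 then "High Grade of security"
    else if weaknesses.length ≤ 2 then "Medium Grade of security"
    else "Low Grade of security")

-- ===== PORT B =====
-- string.ascii_uppercase / ascii_lowercase / digits
def pvUpperS : List Char := "ABCDEFGHIJKLMNOPQRSTUVWXYZ".toList
def pvLowerS : List Char := "abcdefghijklmnopqrstuvwxyz".toList
def pvDigitsS : List Char := "0123456789".toList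

-- ''.join(c.lower() if c.isalpha() else ' ' for c in password), per character
def maskAlpha (c : Char) : Char := if PySem.Chars.isalpha c then PySem.Chars.lowerChar c else ' '
-- ''.join(c if c.isdigit() else ' ' for c in password), per character
def maskDigit (c : Char) : Char := if PySem.Chars.isdigit c then c else ' '

def check_password_weaknesses_alt (password : String) (common_passwords : List String) : List String × String :=
  let l := password.toList
  let chars := PySem.Set.ofList l
  let letters := l.map maskAlpha
  let digits := l.map maskDigit
  let weaknesses :=
    (if l.length < 8 then ["Is shorter than the minimum of 8 characters."] else [])
    ++ (if PySem.Set.isdisjoint chars pvUpperS then ["Does not contain any uppercase letters."] else [])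
    ++ (if PySem.Set.isdisjoint chars pvLowerS then ["Does not contain any lowercase letters."] else [])
    ++ (if PySem.Set.isdisjoint chars pvDigitsS then ["Does not contain any numbers."] else [])
    ++ (if PySem.Set.isdisjoint chars pvPunct then ["Does not contain any special characters."] else [])
    ++ (if common_passwords.contains (PySem.Str.lower password) then ["This Password is unfortunally known in A Password Leak"] else [])
    ++ (if (List.range (pvLowerS.length - 2)).any (fun j =>
            PySem.Chars.isIn (PySem.List.slice pvLowerS (some (j : Int)) (some ((j : Int) + 3))) letters)
        then ["Contains sequential characters (like 'abc')."] else [])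
    ++ (if (List.range (pvDigitsS.length - 2)).any (fun j =>
            PySem.Chars.isIn (PySem.List.slice pvDigitsS (some (j : Int)) (some ((j : Int) + 3))) digits)
        then ["Contains sequential numbers (like '123')."] else [])
    ++ (if chars.any (fun c => PySem.Chars.isIn [c, c, c] l) then ["Contains repeating characters (like 'aaa')."] else [])
  (weaknesses,
    if weaknesses.length == 0 then "High Grade of security"
    else if weaknesses.length ≤ 2 then "Medium Grade of security"
    else "Low Grade of security")

-- ===== PRECONDITION & SPEC =====
def Spec_check_password_weaknesses (password : String) (common_passwords : List String) (out : List String × String) : Prop := out = check_password_weaknesses_alt password common_passwords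
instance (password : String) (common_passwords : List String) (out : List String × String) : Decidable (Spec_check_password_weaknesses password common_passwords out) := by unfold Spec_check_password_weaknesses; infer_instance

-- ===== CLAIM (what is proved, stated in full; the proofs are below) =====
def Claim_equal_check_password_weaknesses : Prop := ∀ (password : String) (common_passwords : List String), Dom_check_password_weaknesses password common_passwords → Spec_check_password_weaknesses password common_passwords (check_password_weaknesses password common_passwords)

-- ===== LEMMAS AND PROOFS =====

-- A's break-loop is an existence scan
theorem aLoop_eq_any (cond : Nat → Bool) (i stop : Nat) :
    aLoop cond i stop = (List.range' i (stop - i)).any cond := by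
  by_cases h : i < stop
  · obtain ⟨k, hk⟩ : ∃ k, stop - i = k + 1 := ⟨stop - i - 1, by omega⟩
    rw [aLoop, if_pos h, hk, List.range'_succ, List.any_cons]
    have : stop - (i + 1) = k := by omega
    rw [aLoop_eq_any cond (i+1) stop, this]
    cases cond i <;> simp
  · rw [aLoop, if_neg h]
    have : stop - i = 0 := by omega
    simp [this]
termination_by stop - i

theorem aLoop_zero (cond : Nat → Bool) (stop : Nat) :
    aLoop cond 0 stop = (List.range stop).any cond := by
  rw [aLoop_eq_any, List.range_eq_range', Nat.sub_zero]

-- an `any` over the distinct elements equals the `any` over the list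
theorem any_ofList (l : List Char) (p : Char → Bool) :
    (PySem.Set.ofList l).any p = l.any p := by
  rw [Bool.eq_iff_iff]
  simp only [List.any_eq_true, PySem.Set.mem_ofList]

-- equal toNat means equal characters
theorem char_eq_of_toNat (c d : Char) (h : c.toNat = d.toNat) : c = d := by
  have h1 := Char.ofNat_toNat c
  have h2 := Char.ofNat_toNat d
  rw [← h1, ← h2, h]

-- membership in a class constant is the corresponding class predicate
theorem contains_upper (c : Char) : pvUpperS.contains c = PySem.Chars.isupper c := by
  rw [Bool.eq_iff_iff]
  have hmem : pvUpperS.contains c = true ↔ c ∈ pvUpperS := by simp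
  have hup : PySem.Chars.isupper c = true ↔ 65 ≤ c.toNat ∧ c.toNat ≤ 90 := by
    simp only [PySem.Chars.isupper, Bool.and_eq_true, decide_eq_true_eq]
    exact ⟨fun ⟨a, b⟩ => ⟨a, b⟩, fun ⟨a, b⟩ => ⟨a, b⟩⟩
  rw [hmem, hup]
  have hgd : ∀ j, j < 26 → (pvUpperS.getD j ' ').toNat = 65 + j := by decide
  constructor
  · intro h
    obtain ⟨j, hj, rfl⟩ := List.mem_iff_getElem.mp h
    have hjn : j < 26 := by rw [show pvUpperS.length = 26 from by decide] at hj; omega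
    have := hgd j hjn
    rw [List.getD_eq_getElem pvUpperS ' ' hj] at this
    omega
  · rintro ⟨h1, h2⟩
    have hj := hgd (c.toNat - 65) (by omega)
    have hc : pvUpperS.getD (c.toNat - 65) ' ' = c := char_eq_of_toNat _ _ (by omega)
    rw [← hc, List.getD_eq_getElem pvUpperS ' ' (by rw [show pvUpperS.length = 26 from by decide]; omega)]
    exact List.getElem_mem _

theorem contains_lower (c : Char) : pvLowerS.contains c = PySem.Chars.islower c := by
  rw [Bool.eq_iff_iff]
  have hmem : pvLowerS.contains c = true ↔ c ∈ pvLowerS := by simp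
  have hlo : PySem.Chars.islower c = true ↔ 97 ≤ c.toNat ∧ c.toNat ≤ 122 := by
    simp only [PySem.Chars.islower, Bool.and_eq_true, decide_eq_true_eq]
    exact ⟨fun ⟨a, b⟩ => ⟨a, b⟩, fun ⟨a, b⟩ => ⟨a, b⟩⟩
  rw [hmem, hlo]
  have hgd : ∀ j, j < 26 → (pvLowerS.getD j ' ').toNat = 97 + j := by decide
  constructor
  · intro h
    obtain ⟨j, hj, rfl⟩ := List.mem_iff_getElem.mp h
    have hjn : j < 26 := by rw [show pvLowerS.length = 26 from by decide] at hj; omega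
    have := hgd j hjn
    rw [List.getD_eq_getElem pvLowerS ' ' hj] at this
    omega
  · rintro ⟨h1, h2⟩
    have hj := hgd (c.toNat - 97) (by omega)
    have hc : pvLowerS.getD (c.toNat - 97) ' ' = c := char_eq_of_toNat _ _ (by omega)
    rw [← hc, List.getD_eq_getElem pvLowerS ' ' (by rw [show pvLowerS.length = 26 from by decide]; omega)]
    exact List.getElem_mem _

theorem contains_digit (c : Char) : pvDigitsS.contains c = PySem.Chars.isdigit c := by
  rw [Bool.eq_iff_iff]
  have hmem : pvDigitsS.contains c = true ↔ c ∈ pvDigitsS := by simp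
  have hdg : PySem.Chars.isdigit c = true ↔ 48 ≤ c.toNat ∧ c.toNat ≤ 57 := by
    simp only [PySem.Chars.isdigit, Bool.and_eq_true, decide_eq_true_eq]
    exact ⟨fun ⟨a, b⟩ => ⟨a, b⟩, fun ⟨a, b⟩ => ⟨a, b⟩⟩
  rw [hmem, hdg]
  have hgd : ∀ j, j < 10 → (pvDigitsS.getD j ' ').toNat = 48 + j := by decide
  constructor
  · intro h
    obtain ⟨j, hj, rfl⟩ := List.mem_iff_getElem.mp h
    have hjn : j < 10 := by rw [show pvDigitsS.length = 10 from by decide] at hj; omega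
    have := hgd j hjn
    rw [List.getD_eq_getElem pvDigitsS ' ' hj] at this
    omega
  · rintro ⟨h1, h2⟩
    have hj := hgd (c.toNat - 48) (by omega)
    have hc : pvDigitsS.getD (c.toNat - 48) ' ' = c := char_eq_of_toNat _ _ (by omega)
    rw [← hc, List.getD_eq_getElem pvDigitsS ' ' (by rw [show pvDigitsS.length = 10 from by decide]; omega)]
    exact List.getElem_mem _

theorem contains_punct (c : Char) : pvPunct.contains c = punctMem c := by
  rw [Bool.eq_iff_iff]
  have hmem : pvPunct.contains c = true ↔ c ∈ pvPunct := by simp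
  unfold punctMem
  rw [hmem, PySem.Chars.isIn_iff_infix, List.singleton_infix_iff]

-- B's set-disjointness test is the negated class scan
theorem isdisjoint_eq (l cls : List Char) (p : Char → Bool)
    (h : ∀ c, cls.contains c = p c) :
    PySem.Set.isdisjoint (PySem.Set.ofList l) cls = !(l.any p) := by
  unfold PySem.Set.isdisjoint PySem.Set.contains
  rw [show (fun c => cls.contains c) = p from funext h, any_ofList]

theorem drop_take_three (l : List Char) (i : Nat) (h : i + 2 < l.length) :
    (l.drop i).take 3 = [l.getD i ' ', l.getD (i+1) ' ', l.getD (i+2) ' '] := by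
  have h1 : i < l.length := by omega
  have h2 : i + 1 < l.length := by omega
  have h3 : i + 1 + 1 < l.length := by omega
  rw [List.getD_eq_getElem l ' ' h1, List.getD_eq_getElem l ' ' h2,
      List.getD_eq_getElem l ' ' (show i + 2 < l.length from h),
      List.drop_eq_getElem_cons h1, List.drop_eq_getElem_cons h2, List.drop_eq_getElem_cons h3]
  rfl

theorem slice_three (l : List Char) (i : Nat) (h : i + 2 < l.length) :
    PySem.List.slice l (some (i : Int)) (some ((i : Int) + 3))
      = [l.getD i ' ', l.getD (i+1) ' ', l.getD (i+2) ' '] := by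
  have h3 : ((i : Int) + 3) = ((i : Int) + ((3 : Nat) : Int)) := by norm_num
  rw [h3, PySem.List.slice_natCast_add, drop_take_three l i h]

-- three-element infix, characterised by its window
theorem infix3_iff (a b c : Char) (m : List Char) :
    [a, b, c] <:+: m ↔ ∃ i, i + 2 < m.length ∧
      m.getD i ' ' = a ∧ m.getD (i+1) ' ' = b ∧ m.getD (i+2) ' ' = c := by
  rw [← PySem.Chars.isIn_iff_infix, ← PySem.Chars.exists_prefix_drop_iff_isIn]
  constructor
  · rintro ⟨j, hp⟩
    rw [List.prefix_iff_eq_take] at hp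
    rw [show ([a, b, c] : List Char).length = 3 from rfl] at hp
    have hlen : j + 2 < m.length := by
      have := congrArg List.length hp
      simp only [List.length_take, List.length_drop, List.length_cons, List.length_nil] at this
      omega
    rw [drop_take_three m j hlen] at hp
    simp only [List.cons.injEq, and_true] at hp
    exact ⟨j, hlen, hp.1.symm, hp.2.1.symm, hp.2.2.symm⟩
  · rintro ⟨i, hlen, e1, e2, e3⟩
    refine ⟨i, ?_⟩
    rw [List.prefix_iff_eq_take, show ([a, b, c] : List Char).length = 3 from rfl,
        drop_take_three m i hlen, e1, e2, e3]

-- getD through a mask that fixes the default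
theorem getD_map_mask (f : Char → Char) (hf : f ' ' = ' ') (l : List Char) (k : Nat) :
    (l.map f).getD k ' ' = f (l.getD k ' ') := by
  by_cases h : k < l.length
  · rw [List.getD_eq_getElem (l.map f) ' ' (by simpa using h), List.getD_eq_getElem l ' ' h,
        List.getElem_map]
  · have h1 : l.length ≤ k := by omega
    rw [List.getD_eq_default _ _ (by simpa using h1), List.getD_eq_default _ _ h1, hf]

-- B's substring test for one window of the class constant
theorem isIn_slice_iff (S : List Char) (f : Char → Char) (hf : f ' ' = ' ')
    (l : List Char) (j : Nat) (hj : j + 2 < S.length) :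
    PySem.Chars.isIn (PySem.List.slice S (some (j : Int)) (some ((j : Int) + 3))) (l.map f) = true ↔
      ∃ i, i + 2 < l.length ∧
        f (l.getD i ' ') = S.getD j ' ' ∧
        f (l.getD (i+1) ' ') = S.getD (j+1) ' ' ∧
        f (l.getD (i+2) ' ') = S.getD (j+2) ' ' := by
  rw [slice_three S j hj, PySem.Chars.isIn_iff_infix, infix3_iff]
  constructor
  · rintro ⟨i, hlen, e1, e2, e3⟩
    rw [List.length_map] at hlen
    rw [getD_map_mask f hf] at e1 e2 e3
    exact ⟨i, hlen, e1, e2, e3⟩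
  · rintro ⟨i, hlen, e1, e2, e3⟩
    refine ⟨i, by simpa using hlen, ?_, ?_, ?_⟩ <;> rw [getD_map_mask f hf] <;> assumption

-- character-class arithmetic facts
theorem upper_shift : ∀ k, k < 91 → 65 ≤ k → (Char.ofNat (k + 32)).toNat = k + 32 := by decide

theorem lowerChar_bounds (c : Char) (h : PySem.Chars.isalpha c = true) :
    97 ≤ (PySem.Chars.lowerChar c).toNat ∧ (PySem.Chars.lowerChar c).toNat ≤ 122 := by
  unfold PySem.Chars.lowerChar
  cases hU : PySem.Chars.isupper c with
  | true =>
    rw [if_pos rfl]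
    simp only [PySem.Chars.isupper, Bool.and_eq_true, decide_eq_true_eq] at hU
    have h1 : 65 ≤ c.toNat := hU.1
    have h2 : c.toNat ≤ 90 := hU.2
    rw [upper_shift c.toNat (by omega) h1]
    omega
  | false =>
    rw [if_neg (by simp)]
    simp only [PySem.Chars.isalpha, hU, Bool.false_or] at h
    simp only [PySem.Chars.islower, Bool.and_eq_true, decide_eq_true_eq] at h
    exact ⟨h.1, h.2⟩

theorem maskAlpha_of_alpha (c : Char) (h : PySem.Chars.isalpha c = true) :
    maskAlpha c = PySem.Chars.lowerChar c := by
  unfold maskAlpha; rw [if_pos h]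

theorem maskAlpha_of_not_alpha (c : Char) (h : PySem.Chars.isalpha c = false) :
    maskAlpha c = ' ' := by
  unfold maskAlpha; rw [if_neg (by simp [h])]

theorem alpha_of_maskAlpha (c : Char) (h : 97 ≤ (maskAlpha c).toNat) :
    PySem.Chars.isalpha c = true := by
  cases hA : PySem.Chars.isalpha c with
  | true => rfl
  | false => rw [maskAlpha_of_not_alpha c hA] at h; exact absurd h (by decide)

theorem maskDigit_of_digit (c : Char) (h : PySem.Chars.isdigit c = true) :
    maskDigit c = c := by
  unfold maskDigit; rw [if_pos h]

theorem maskDigit_of_not_digit (c : Char) (h : PySem.Chars.isdigit c = false) :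
    maskDigit c = ' ' := by
  unfold maskDigit; rw [if_neg (by simp [h])]

theorem digit_of_maskDigit (c : Char) (h : 48 ≤ (maskDigit c).toNat) :
    PySem.Chars.isdigit c = true := by
  cases hA : PySem.Chars.isdigit c with
  | true => rfl
  | false => rw [maskDigit_of_not_digit c hA] at h; exact absurd h (by decide)

theorem digit_bounds (c : Char) (h : PySem.Chars.isdigit c = true) :
    48 ≤ c.toNat ∧ c.toNat ≤ 57 := by
  simp only [PySem.Chars.isdigit, Bool.and_eq_true, decide_eq_true_eq] at h
  exact ⟨h.1, h.2⟩

-- int(c) for a digit character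
theorem ofChars_digit (c : Char) (h : PySem.Chars.isdigit c = true) :
    (PySem.Int.ofChars? [c]).getD 0 = (c.toNat : Int) - 48 := by
  obtain ⟨h1, h2⟩ := digit_bounds c h
  have key : ∀ k, k < 58 → 48 ≤ k → (PySem.Int.ofChars? [Char.ofNat k]).getD 0 = (k : Int) - 48 := by
    decide
  have := key c.toNat (by omega) h1
  rwa [Char.ofNat_toNat] at this

-- the class constants, indexed
theorem pvLowerS_getD : ∀ j, j < 26 → (pvLowerS.getD j ' ').toNat = 97 + j := by decide
theorem pvDigitsS_getD : ∀ j, j < 10 → (pvDigitsS.getD j ' ').toNat = 48 + j := by decide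

-- A's sequential-letters window, characterised as a match of one alphabet window
theorem condAlphaA_iff (l : List Char) (i : Nat) (h : i + 2 < l.length) :
    condAlphaA l i = true ↔ ∃ j, j + 2 < 26 ∧
      maskAlpha (l.getD i ' ') = pvLowerS.getD j ' ' ∧
      maskAlpha (l.getD (i+1) ' ') = pvLowerS.getD (j+1) ' ' ∧
      maskAlpha (l.getD (i+2) ' ') = pvLowerS.getD (j+2) ' ' := by
  unfold condAlphaA
  rw [slice_three l i h]
  simp only [PySem.Chars.strIsalpha, List.isEmpty_cons, Bool.not_false, Bool.true_and,
    List.all_cons, List.all_nil, Bool.and_true, Bool.and_eq_true, beq_iff_eq]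
  constructor
  · rintro ⟨⟨⟨ha0, ha1, ha2⟩, e1⟩, e2⟩
    obtain ⟨b0, t0⟩ := lowerChar_bounds _ ha0
    obtain ⟨b2, t2⟩ := lowerChar_bounds _ ha2
    refine ⟨(PySem.Chars.lowerChar (l.getD i ' ')).toNat - 97, by omega, ?_, ?_, ?_⟩
    · rw [maskAlpha_of_alpha _ ha0]; apply char_eq_of_toNat; rw [pvLowerS_getD _ (by omega)]; omega
    · rw [maskAlpha_of_alpha _ ha1]; apply char_eq_of_toNat; rw [pvLowerS_getD _ (by omega)]; omega
    · rw [maskAlpha_of_alpha _ ha2]; apply char_eq_of_toNat; rw [pvLowerS_getD _ (by omega)]; omega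
  · rintro ⟨j, hj, e0, e1, e2⟩
    have n0 := congrArg Char.toNat e0
    have n1 := congrArg Char.toNat e1
    have n2 := congrArg Char.toNat e2
    rw [pvLowerS_getD j (by omega)] at n0
    rw [pvLowerS_getD (j+1) (by omega)] at n1
    rw [pvLowerS_getD (j+2) (by omega)] at n2
    have ha0 := alpha_of_maskAlpha (l.getD i ' ') (by omega)
    have ha1 := alpha_of_maskAlpha (l.getD (i+1) ' ') (by omega)
    have ha2 := alpha_of_maskAlpha (l.getD (i+2) ' ') (by omega)
    rw [maskAlpha_of_alpha _ ha0] at n0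
    rw [maskAlpha_of_alpha _ ha1] at n1
    rw [maskAlpha_of_alpha _ ha2] at n2
    exact ⟨⟨⟨ha0, ha1, ha2⟩, by omega⟩, by omega⟩

-- A's sequential-digits window, characterised as a match of one digit window
theorem condDigitA_iff (l : List Char) (i : Nat) (h : i + 2 < l.length) :
    condDigitA l i = true ↔ ∃ j, j + 2 < 10 ∧
      maskDigit (l.getD i ' ') = pvDigitsS.getD j ' ' ∧
      maskDigit (l.getD (i+1) ' ') = pvDigitsS.getD (j+1) ' ' ∧
      maskDigit (l.getD (i+2) ' ') = pvDigitsS.getD (j+2) ' ' := by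
  unfold condDigitA
  rw [slice_three l i h]
  simp only [PySem.Chars.strIsdigit, List.isEmpty_cons, Bool.not_false, Bool.true_and,
    List.all_cons, List.all_nil, Bool.and_true, Bool.and_eq_true, beq_iff_eq]
  constructor
  · rintro ⟨⟨⟨hd0, hd1, hd2⟩, e1⟩, e2⟩
    rw [ofChars_digit _ hd0, ofChars_digit _ hd1] at e1
    rw [ofChars_digit _ hd1, ofChars_digit _ hd2] at e2
    obtain ⟨b0, t0⟩ := digit_bounds _ hd0
    obtain ⟨b2, t2⟩ := digit_bounds _ hd2
    refine ⟨(l.getD i ' ').toNat - 48, by omega, ?_, ?_, ?_⟩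
    · rw [maskDigit_of_digit _ hd0]; apply char_eq_of_toNat; rw [pvDigitsS_getD _ (by omega)]; omega
    · rw [maskDigit_of_digit _ hd1]; apply char_eq_of_toNat; rw [pvDigitsS_getD _ (by omega)]; omega
    · rw [maskDigit_of_digit _ hd2]; apply char_eq_of_toNat; rw [pvDigitsS_getD _ (by omega)]; omega
  · rintro ⟨j, hj, e0, e1, e2⟩
    have n0 := congrArg Char.toNat e0
    have n1 := congrArg Char.toNat e1
    have n2 := congrArg Char.toNat e2
    rw [pvDigitsS_getD j (by omega)] at n0
    rw [pvDigitsS_getD (j+1) (by omega)] at n1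
    rw [pvDigitsS_getD (j+2) (by omega)] at n2
    have hd0 := digit_of_maskDigit (l.getD i ' ') (by omega)
    have hd1 := digit_of_maskDigit (l.getD (i+1) ' ') (by omega)
    have hd2 := digit_of_maskDigit (l.getD (i+2) ' ') (by omega)
    rw [maskDigit_of_digit _ hd0] at n0
    rw [maskDigit_of_digit _ hd1] at n1
    rw [maskDigit_of_digit _ hd2] at n2
    refine ⟨⟨⟨hd0, hd1, hd2⟩, ?_⟩, ?_⟩
    · rw [ofChars_digit _ hd0, ofChars_digit _ hd1]; omega
    · rw [ofChars_digit _ hd1, ofChars_digit _ hd2]; omega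

-- the sequential-letters rule: A's window scan ↔ B's alphabet-substring search
theorem seq_alpha_eq (l : List Char) :
    aLoop (condAlphaA l) 0 (l.length - 2)
      = (List.range (pvLowerS.length - 2)).any (fun j =>
          PySem.Chars.isIn (PySem.List.slice pvLowerS (some (j : Int)) (some ((j : Int) + 3))) (l.map maskAlpha)) := by
  have hS : pvLowerS.length = 26 := by decide
  rw [Bool.eq_iff_iff, aLoop_zero]
  simp only [List.any_eq_true, List.mem_range]
  constructor
  · rintro ⟨i, hi, hc⟩
    have hin : i + 2 < l.length := by omega
    obtain ⟨j, hj, e⟩ := (condAlphaA_iff l i hin).mp hc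
    exact ⟨j, by omega, (isIn_slice_iff pvLowerS maskAlpha rfl l j (by omega)).mpr ⟨i, hin, e⟩⟩
  · rintro ⟨j, hj, hc⟩
    rw [hS] at hj
    obtain ⟨i, hin, e⟩ := (isIn_slice_iff pvLowerS maskAlpha rfl l j (by omega)).mp hc
    exact ⟨i, by omega, (condAlphaA_iff l i hin).mpr ⟨j, by omega, e⟩⟩

-- the sequential-digits rule: A's window scan ↔ B's digit-substring search
theorem seq_digit_eq (l : List Char) :
    aLoop (condDigitA l) 0 (l.length - 2)
      = (List.range (pvDigitsS.length - 2)).any (fun j =>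
          PySem.Chars.isIn (PySem.List.slice pvDigitsS (some (j : Int)) (some ((j : Int) + 3))) (l.map maskDigit)) := by
  have hS : pvDigitsS.length = 10 := by decide
  rw [Bool.eq_iff_iff, aLoop_zero]
  simp only [List.any_eq_true, List.mem_range]
  constructor
  · rintro ⟨i, hi, hc⟩
    have hin : i + 2 < l.length := by omega
    obtain ⟨j, hj, e⟩ := (condDigitA_iff l i hin).mp hc
    exact ⟨j, by omega, (isIn_slice_iff pvDigitsS maskDigit rfl l j (by omega)).mpr ⟨i, hin, e⟩⟩
  · rintro ⟨j, hj, hc⟩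
    rw [hS] at hj
    obtain ⟨i, hin, e⟩ := (isIn_slice_iff pvDigitsS maskDigit rfl l j (by omega)).mp hc
    exact ⟨i, by omega, (condDigitA_iff l i hin).mpr ⟨j, by omega, e⟩⟩

-- the repeat rule: A's window scan ↔ B's c*3-substring search over the distinct characters
theorem rep_eq (l : List Char) :
    aLoop (condRep l) 0 (l.length - 2)
      = (PySem.Set.ofList l).any (fun c => PySem.Chars.isIn [c, c, c] l) := by
  rw [Bool.eq_iff_iff, aLoop_zero, any_ofList]
  simp only [List.any_eq_true, List.mem_range]
  constructor
  · rintro ⟨i, hi, hc⟩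
    have hin : i + 2 < l.length := by omega
    unfold condRep at hc
    simp only [Bool.and_eq_true, beq_iff_eq] at hc
    refine ⟨l.getD i ' ', ?_, ?_⟩
    · rw [List.getD_eq_getElem l ' ' (by omega)]
      exact List.getElem_mem _
    · rw [PySem.Chars.isIn_iff_infix, infix3_iff]
      exact ⟨i, hin, rfl, hc.1.symm, by rw [← hc.2, ← hc.1]⟩
  · rintro ⟨c, _, hc⟩
    rw [PySem.Chars.isIn_iff_infix, infix3_iff] at hc
    obtain ⟨i, hin, e1, e2, e3⟩ := hc
    refine ⟨i, by omega, ?_⟩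
    unfold condRep
    simp only [Bool.and_eq_true, beq_iff_eq]
    exact ⟨e1.trans e2.symm, e2.trans e3.symm⟩

-- ===== VERDICT (by name: the statement is the Claim_ definition above) =====
theorem check_password_weaknesses_spec : Claim_equal_check_password_weaknesses := by
  intro password common_passwords _
  show _ = _
  unfold check_password_weaknesses check_password_weaknesses_alt
  simp only [isdisjoint_eq _ _ _ contains_upper, isdisjoint_eq _ _ _ contains_lower,
    isdisjoint_eq _ _ _ contains_digit, isdisjoint_eq _ _ _ contains_punct,
    seq_alpha_eq, seq_digit_eq, rep_eq]
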